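-- pv_equiv track=rewrite | github.com/rlbr/Asst_5 | A5_P4_Minimax_LASTNAME_FIRSTNAME.py | DG_Max_Value
-- ===== SOURCE A (Python) =====
-- def eliminate(n, divisors):
--     return [d for d in divisors if n % d != 0]
--
-- def DG_Max_Value(divisors):
--     if len(divisors) == 0:
--         return [1, -1, 1]
--     max_u = -69_420
--     total_nodes_visited = 1
--     return_action = -1111111
--     for action in divisors:
--         utility, nah, nodes_visited = DG_Min_Value(eliminate(action, divisors))
--         max_u = max(utility, max_u)
--         if utility == max_u:
--             return_action = action
--         total_nodes_visited += nodes_visited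
--     return [max_u, return_action, total_nodes_visited]
--
-- def DG_Min_Value(divisors):
--     min_u = 69_420
--     if len(divisors) == 0:
--         return [0, -1, 1]
--     min_u = 69_420
--     total_nodes_visited = 1
--     return_action = -1111111
--     for action in divisors:
--         utility, nah, nodes_visited = DG_Max_Value(eliminate(action, divisors))
--         min_u = min(utility, min_u)
--         if utility == min_u:
--             return_action = action
--         total_nodes_visited += nodes_visited
--     return [min_u, return_action, total_nodes_visited]
-- ===== SOURCE B (Python) =====
-- def eliminate(n, divisors):
--     return [d for d in divisors if n % d != 0]
--
-- def DG_Max_Value(divisors):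
--     memo = {}
--
--     def solve(is_max, divs):
--         key = (is_max, divs)
--         hit = memo.get(key)
--         if hit is not None:
--             return hit
--         if not divs:
--             res = (1 if is_max else 0, -1, 1)
--         else:
--             best = None
--             action = -1111111
--             nodes = 1
--             for a in divs:
--                 u, _, nv = solve(not is_max, tuple(eliminate(a, divs)))
--                 nodes += nv
--                 if best is None or (u >= best if is_max else u <= best):
--                     best = u
--                     action = a
--             res = (best, action, nodes)
--         memo[key] = res
--         return res
--
--     u, a, n = solve(True, tuple(divisors))
--     return [u, a, n]
-- ===== Notes on version B (the rewrite author's own statement) =====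
-- stated objective: faster
-- what changed: B replaces A's pair of mutually recursive functions that recompute every subgame from scratch with a single memoized solver keyed by (player, remaining-divisors tuple), so each reachable subgame is solved once.
import Mathlib
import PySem

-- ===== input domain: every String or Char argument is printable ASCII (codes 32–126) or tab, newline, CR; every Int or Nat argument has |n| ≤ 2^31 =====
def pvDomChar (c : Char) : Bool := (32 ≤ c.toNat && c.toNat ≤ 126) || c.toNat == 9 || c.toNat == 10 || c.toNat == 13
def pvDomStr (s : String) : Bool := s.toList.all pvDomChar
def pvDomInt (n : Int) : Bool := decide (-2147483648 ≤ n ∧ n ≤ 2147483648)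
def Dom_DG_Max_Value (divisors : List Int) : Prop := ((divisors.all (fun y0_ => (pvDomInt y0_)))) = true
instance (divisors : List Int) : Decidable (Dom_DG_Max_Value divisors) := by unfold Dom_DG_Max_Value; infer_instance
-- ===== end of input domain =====

-- B memoizes the game-tree search by (player, remaining divisors); RETURN-value equivalence with A is proved on Pre_ (no zero divisor).

-- ===== PORT A =====
-- eliminate(n, divisors): keep d with n % d != 0 (Python % = PySem.Int.mod; raises on d = 0, excluded by Pre_)
def pyElim (n : Int) (ds : List Int) : List Int :=
  ds.filter (fun d => PySem.Int.mod n d != 0)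

-- 'for action in divisors' of DG_Max_Value / DG_Min_Value as explicit loops; the fuel argument is a
-- totality guard only (each recursive call's list is strictly shorter, so fuel len+1 is never exhausted).
mutual
def pyMaxF : Nat → List Int → Int × Int × Int
  | 0, _ => (0, -1, 0)
  | n+1, ds =>
    if ds.length = 0 then (1, -1, 1)
    else pyMaxLoop n ds ds (-69420) (-1111111) 1
termination_by n _ => (n, 0, 0)

def pyMaxLoop : Nat → List Int → List Int → Int → Int → Int → Int × Int × Int
  | _, _, [], mu, ra, tot => (mu, ra, tot)
  | n, ds, a :: rest, mu, ra, tot =>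
    let r := pyMinF n (pyElim a ds)
    let mu' := max r.1 mu
    pyMaxLoop n ds rest mu' (if r.1 = mu' then a else ra) (tot + r.2.2)
termination_by n _ acts _ _ _ => (n, 1, acts.length)

def pyMinF : Nat → List Int → Int × Int × Int
  | 0, _ => (0, -1, 0)
  | n+1, ds =>
    if ds.length = 0 then (0, -1, 1)
    else pyMinLoop n ds ds 69420 (-1111111) 1
termination_by n _ => (n, 0, 0)

def pyMinLoop : Nat → List Int → List Int → Int → Int → Int → Int × Int × Int
  | _, _, [], mu, ra, tot => (mu, ra, tot)
  | n, ds, a :: rest, mu, ra, tot =>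
    let r := pyMaxF n (pyElim a ds)
    let mu' := min r.1 mu
    pyMinLoop n ds rest mu' (if r.1 = mu' then a else ra) (tot + r.2.2)
termination_by n _ acts _ _ _ => (n, 1, acts.length)
end

def DG_Max_Value (divisors : List Int) : List Int :=
  let t := pyMaxF (divisors.length + 1) divisors
  [t.1, t.2.1, t.2.2]

-- ===== PORT B =====
-- memo : dict keyed by (is_max, remaining divisors); solve(is_max, divs) computed once per key.
mutual
def solveF : Nat → Bool → List Int → PySem.Dict (Bool × List Int) (Int × Int × Int) →
    (Int × Int × Int) × PySem.Dict (Bool × List Int) (Int × Int × Int)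
  | 0, _, _, memo => ((0, 0, 0), memo)
  | n+1, isMax, divs, memo =>
    match memo.get? (isMax, divs) with
    | some v => (v, memo)
    | none =>
      if divs.length = 0 then
        let res : Int × Int × Int := (if isMax then 1 else 0, -1, 1)
        (res, memo.insert (isMax, divs) res)
      else
        let st := solveLoop n isMax divs divs none (-1111111) 1 memo
        let res : Int × Int × Int := (st.1.getD 0, st.2.1, st.2.2.1)
        (res, st.2.2.2.insert (isMax, divs) res)
termination_by n _ _ _ => (n, 0, 0)

def solveLoop : Nat → Bool → List Int → List Int → Option Int → Int → Int →
    PySem.Dict (Bool × List Int) (Int × Int × Int) →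
    Option Int × Int × Int × PySem.Dict (Bool × List Int) (Int × Int × Int)
  | _, _, _, [], best, act, nodes, memo => (best, act, nodes, memo)
  | n, isMax, divs, a :: rest, best, act, nodes, memo =>
    let p := solveF n (!isMax) (pyElim a divs) memo
    let u := p.1.1
    let better := match best with
      | none => true
      | some b => if isMax then decide (b ≤ u) else decide (u ≤ b)
    if better then solveLoop n isMax divs rest (some u) a (nodes + p.1.2.2) p.2
    else solveLoop n isMax divs rest best act (nodes + p.1.2.2) p.2
termination_by n _ _ acts _ _ _ _ => (n, 1, acts.length)
end
def DG_Max_Value_alt (divisors : List Int) : List Int :=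
  let p := solveF (divisors.length + 1) true divisors PySem.Dict.empty
  [p.1.1, p.1.2.1, p.1.2.2]

-- ===== PRECONDITION & SPEC =====
-- Pre_ excludes exactly the inputs on which Python A raises: a list containing 0 makes eliminate compute n % 0 (ZeroDivisionError).
def Pre_DG_Max_Value (divisors : List Int) : Prop := (0 : Int) ∉ divisors
instance (divisors : List Int) : Decidable (Pre_DG_Max_Value divisors) := by unfold Pre_DG_Max_Value; infer_instance
def pvWitness_DG_Max_Value : List Int := [2, 3]

def Spec_DG_Max_Value (divisors : List Int) (out : List Int) : Prop := out = DG_Max_Value_alt divisors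
instance (divisors : List Int) (out : List Int) : Decidable (Spec_DG_Max_Value divisors out) := by unfold Spec_DG_Max_Value; infer_instance

-- ===== CLAIM (what is proved, stated in full; the proofs are below) =====
def Claim_equal_DG_Max_Value : Prop := ∀ (divisors : List Int), Dom_DG_Max_Value divisors → Pre_DG_Max_Value divisors → Spec_DG_Max_Value divisors (DG_Max_Value divisors)

-- ===== LEMMAS AND PROOFS =====

abbrev Memo := PySem.Dict (Bool × List Int) (Int × Int × Int)

theorem filter_len_lt {p : Int → Bool} :
    ∀ {ds : List Int} {a : Int}, a ∈ ds → p a = false → (ds.filter p).length < ds.length := by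
  intro ds
  induction ds with
  | nil => intro a ha _; cases ha
  | cons x xs ih =>
    intro a ha hpa
    rcases List.mem_cons.1 ha with rfl | ha'
    · have hle := List.length_filter_le p xs
      simp [hpa]
      omega
    · have hlt := ih ha' hpa
      simp only [List.filter_cons, List.length_cons]
      split
      · simpa using Nat.succ_lt_succ hlt
      · omega

-- eliminate always removes the action itself (a % a == 0), so the list strictly shrinks
theorem pyElim_len_lt {a : Int} {ds : List Int} (h : a ∈ ds) :
    (pyElim a ds).length < ds.length := by
  unfold pyElim
  exact filter_len_lt h (by simp [PySem.Int.mod_eq_zero_iff_dvd])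

-- canonical value of a position
def pvT (b : Bool) (ds : List Int) : Int × Int × Int :=
  if b then pyMaxF (ds.length + 1) ds else pyMinF (ds.length + 1) ds

-- memo invariant: every stored value is the canonical value of its key
def pvInv (memo : Memo) : Prop :=
  ∀ b ds v, memo.get? (b, ds) = some v → v = pvT b ds

theorem pvInv_empty : pvInv PySem.Dict.empty := by
  intro b ds v h
  simp [PySem.Dict.get?, PySem.Dict.empty] at h

theorem pvInv_insert {memo : Memo} (h : pvInv memo) (b : Bool) (ds : List Int)
    (v : Int × Int × Int) (hv : v = pvT b ds) : pvInv (memo.insert (b, ds) v) := by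
  intro b' ds' w hw
  rw [PySem.Dict.get?_insert] at hw
  split at hw
  · next heq =>
    simp only [Prod.mk.injEq] at heq
    obtain ⟨rfl, rfl⟩ := heq
    cases hw
    exact hv
  · exact h _ _ _ hw

-- fuel stability of the A-side functions
theorem stab : ∀ n, ∀ (ds : List Int) (m : Nat), ds.length < n → ds.length < m →
    pyMaxF n ds = pyMaxF m ds ∧ pyMinF n ds = pyMinF m ds := by
  intro n
  induction n using Nat.strong_induction_on with
  | _ n IH =>
    intro ds m hn hm
    cases n with
    | zero => exact absurd hn (Nat.not_lt_zero _)
    | succ k =>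
      cases m with
      | zero => exact absurd hm (Nat.not_lt_zero _)
      | succ j =>
        have hk : ds.length ≤ k := Nat.lt_succ_iff.1 hn
        have hj : ds.length ≤ j := Nat.lt_succ_iff.1 hm
        by_cases h0 : ds.length = 0
        · constructor <;> simp [pyMaxF, pyMinF, h0]
        · have LMax : ∀ acts : List Int, (∀ a ∈ acts, a ∈ ds) → ∀ mu ra tot : Int,
              pyMaxLoop k ds acts mu ra tot = pyMaxLoop j ds acts mu ra tot := by
            intro acts
            induction acts with
            | nil => intro _ mu ra tot; simp [pyMaxLoop]
            | cons a rest iha =>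
              intro hsub mu ra tot
              have ha : a ∈ ds := hsub a (List.mem_cons_self)
              have h1 : (pyElim a ds).length < k := lt_of_lt_of_le (pyElim_len_lt ha) hk
              have h2 : (pyElim a ds).length < j := lt_of_lt_of_le (pyElim_len_lt ha) hj
              have heq := (IH k (Nat.lt_succ_self k) (pyElim a ds) j h1 h2).2
              simp only [pyMaxLoop]
              rw [heq]
              exact iha (fun x hx => hsub x (List.mem_cons_of_mem _ hx)) _ _ _
          have LMin : ∀ acts : List Int, (∀ a ∈ acts, a ∈ ds) → ∀ mu ra tot : Int,
              pyMinLoop k ds acts mu ra tot = pyMinLoop j ds acts mu ra tot := by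
            intro acts
            induction acts with
            | nil => intro _ mu ra tot; simp [pyMinLoop]
            | cons a rest iha =>
              intro hsub mu ra tot
              have ha : a ∈ ds := hsub a (List.mem_cons_self)
              have h1 : (pyElim a ds).length < k := lt_of_lt_of_le (pyElim_len_lt ha) hk
              have h2 : (pyElim a ds).length < j := lt_of_lt_of_le (pyElim_len_lt ha) hj
              have heq := (IH k (Nat.lt_succ_self k) (pyElim a ds) j h1 h2).1
              simp only [pyMinLoop]
              rw [heq]
              exact iha (fun x hx => hsub x (List.mem_cons_of_mem _ hx)) _ _ _
          constructor
          · simp only [pyMaxF, if_neg h0]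
            exact LMax ds (fun _ h => h) _ _ _
          · simp only [pyMinF, if_neg h0]
            exact LMin ds (fun _ h => h) _ _ _

-- value bounds (the sentinels -69420 / 69420 never win against a real child value)
theorem maxLoop_lb : ∀ (n : Nat) (ds acts : List Int) (mu ra tot : Int),
    -69420 ≤ mu → -69420 ≤ (pyMaxLoop n ds acts mu ra tot).1 := by
  intro n ds acts
  induction acts with
  | nil => intro mu ra tot h; simpa [pyMaxLoop] using h
  | cons a rest ih =>
    intro mu ra tot h
    simp only [pyMaxLoop]
    exact ih _ _ _ (le_trans h (le_max_right _ _))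

theorem pyMaxF_lb (n : Nat) (ds : List Int) : -69420 ≤ (pyMaxF n ds).1 := by
  cases n with
  | zero => simp [pyMaxF]
  | succ k =>
    simp only [pyMaxF]
    split
    · norm_num
    · exact maxLoop_lb _ _ _ _ _ _ le_rfl

theorem minLoop_ub : ∀ (n : Nat) (ds acts : List Int) (mu ra tot : Int),
    mu ≤ 69420 → (pyMinLoop n ds acts mu ra tot).1 ≤ 69420 := by
  intro n ds acts
  induction acts with
  | nil => intro mu ra tot h; simpa [pyMinLoop] using h
  | cons a rest ih =>
    intro mu ra tot h
    simp only [pyMinLoop]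
    exact ih _ _ _ (le_trans (min_le_right _ _) h)

theorem pyMinF_ub (n : Nat) (ds : List Int) : (pyMinF n ds).1 ≤ 69420 := by
  cases n with
  | zero => simp [pyMinF]
  | succ k =>
    simp only [pyMinF]
    split
    · norm_num
    · exact minLoop_ub _ _ _ _ _ _ le_rfl

theorem minLoop_lb : ∀ (n : Nat) (ds acts : List Int) (mu ra tot : Int),
    -69420 ≤ mu → -69420 ≤ (pyMinLoop n ds acts mu ra tot).1 := by
  intro n ds acts
  induction acts with
  | nil => intro mu ra tot h; simpa [pyMinLoop] using h
  | cons a rest ih =>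
    intro mu ra tot h
    simp only [pyMinLoop]
    exact ih _ _ _ (le_min (pyMaxF_lb _ _) h)

theorem pyMinF_lb (n : Nat) (ds : List Int) : -69420 ≤ (pyMinF n ds).1 := by
  cases n with
  | zero => simp [pyMinF]
  | succ k =>
    simp only [pyMinF]
    split
    · norm_num
    · exact minLoop_lb _ _ _ _ _ _ (by norm_num)

theorem maxLoop_ub : ∀ (n : Nat) (ds acts : List Int) (mu ra tot : Int),
    mu ≤ 69420 → (pyMaxLoop n ds acts mu ra tot).1 ≤ 69420 := by
  intro n ds acts
  induction acts with
  | nil => intro mu ra tot h; simpa [pyMaxLoop] using h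
  | cons a rest ih =>
    intro mu ra tot h
    simp only [pyMaxLoop]
    exact ih _ _ _ (max_le (pyMinF_ub _ _) h)

theorem pyMaxF_ub (n : Nat) (ds : List Int) : (pyMaxF n ds).1 ≤ 69420 := by
  cases n with
  | zero => simp [pyMaxF]
  | succ k =>
    simp only [pyMaxF]
    split
    · norm_num
    · exact maxLoop_ub _ _ _ _ _ _ (by norm_num)

-- main lemma: the memoized solver returns the canonical value and preserves the memo invariant
theorem solve_correct : ∀ n (b : Bool) (ds : List Int) (memo : Memo), ds.length < n → pvInv memo →
    (solveF n b ds memo).1 = pvT b ds ∧ pvInv (solveF n b ds memo).2 := by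
  intro n
  induction n using Nat.strong_induction_on with
  | _ n IH =>
    intro b ds memo hn hInv
    cases n with
    | zero => exact absurd hn (Nat.not_lt_zero _)
    | succ k =>
      have hk : ds.length ≤ k := Nat.lt_succ_iff.1 hn
      rw [solveF]
      cases hget : memo.get? (b, ds) with
      | some v =>
        simp only [hget]
        exact ⟨hInv _ _ _ hget, hInv⟩
      | none =>
        simp only [hget]
        by_cases h0 : ds.length = 0
        · have hds : ds = [] := List.length_eq_zero_iff.1 h0
          subst hds
          rw [if_pos h0]
          have hbase : (if b then (1 : Int) else 0, (-1 : Int), (1 : Int)) = pvT b [] := by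
            cases b <;> simp [pvT, pyMaxF, pyMinF]
          exact ⟨hbase, pvInv_insert hInv _ _ _ hbase⟩
        · rw [if_neg h0]
          cases b with
          | true =>
            have Loop : ∀ acts : List Int, (∀ a ∈ acts, a ∈ ds) →
                ∀ (mu act nodes : Int) (best : Option Int) (memo' : Memo), pvInv memo' →
                ((best = none ∧ mu = -69420) ∨ best = some mu) →
                (pyMaxLoop k ds acts mu act nodes).2.1 = (solveLoop k true ds acts best act nodes memo').2.1 ∧
                (pyMaxLoop k ds acts mu act nodes).2.2 = (solveLoop k true ds acts best act nodes memo').2.2.1 ∧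
                pvInv (solveLoop k true ds acts best act nodes memo').2.2.2 ∧
                ((best = none ∧ acts = [] ∧ (solveLoop k true ds acts best act nodes memo').1 = none ∧ (pyMaxLoop k ds acts mu act nodes).1 = mu) ∨
                 (∃ m, (solveLoop k true ds acts best act nodes memo').1 = some m ∧ (pyMaxLoop k ds acts mu act nodes).1 = m)) := by
              intro acts
              induction acts with
              | nil =>
                intro _ mu act nodes best memo' hInv' hrel
                refine ⟨by simp [pyMaxLoop, solveLoop], by simp [pyMaxLoop, solveLoop],
                  by simpa [solveLoop] using hInv', ?_⟩
                rcases hrel with ⟨rfl, rfl⟩ | rfl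
                · exact Or.inl ⟨rfl, rfl, by simp [solveLoop], by simp [pyMaxLoop]⟩
                · exact Or.inr ⟨mu, by simp [solveLoop], by simp [pyMaxLoop]⟩
              | cons a rest iha =>
                intro hsub mu act nodes best memo' hInv' hrel
                have ha : a ∈ ds := hsub a List.mem_cons_self
                have hsub' : ∀ x ∈ rest, x ∈ ds := fun x hx => hsub x (List.mem_cons_of_mem _ hx)
                have hlen : (pyElim a ds).length < k := lt_of_lt_of_le (pyElim_len_lt ha) hk
                have hIH := IH k (Nat.lt_succ_self k) false (pyElim a ds) memo' hlen hInv'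
                have hr : (solveF k false (pyElim a ds) memo').1 = pyMinF k (pyElim a ds) := by
                  rw [hIH.1]
                  simp only [pvT, Bool.false_eq_true, if_false]
                  exact ((stab k (pyElim a ds) ((pyElim a ds).length + 1) hlen (Nat.lt_succ_self _)).2).symm
                rcases hrel with ⟨rfl, rfl⟩ | rfl
                · have hmax : max (pyMinF k (pyElim a ds)).1 (-69420 : Int) = (pyMinF k (pyElim a ds)).1 :=
                    max_eq_left (pyMinF_lb _ _)
                  have step := iha hsub' (pyMinF k (pyElim a ds)).1 a (nodes + (pyMinF k (pyElim a ds)).2.2)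
                      (some (pyMinF k (pyElim a ds)).1) (solveF k false (pyElim a ds) memo').2 hIH.2 (Or.inr rfl)
                  simp only [pyMaxLoop, solveLoop, Bool.not_true, hr, hmax, eq_self_iff_true, if_true]
                  refine ⟨step.1, step.2.1, step.2.2.1, ?_⟩
                  rcases step.2.2.2 with ⟨hno, _⟩ | hsome
                  · exact absurd hno (by simp)
                  · exact Or.inr hsome
                · by_cases hle : mu ≤ (pyMinF k (pyElim a ds)).1
                  · have hmax : max (pyMinF k (pyElim a ds)).1 mu = (pyMinF k (pyElim a ds)).1 :=
                      max_eq_left hle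
                    have step := iha hsub' (pyMinF k (pyElim a ds)).1 a (nodes + (pyMinF k (pyElim a ds)).2.2)
                        (some (pyMinF k (pyElim a ds)).1) (solveF k false (pyElim a ds) memo').2 hIH.2 (Or.inr rfl)
                    simp only [pyMaxLoop, solveLoop, Bool.not_true, hr, hmax, hle, decide_true,
                      eq_self_iff_true, if_true]
                    refine ⟨step.1, step.2.1, step.2.2.1, ?_⟩
                    rcases step.2.2.2 with ⟨hno, _⟩ | hsome
                    · exact absurd hno (by simp)
                    · exact Or.inr hsome
                  · have hmax : max (pyMinF k (pyElim a ds)).1 mu = mu :=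
                      max_eq_right (le_of_not_ge hle)
                    have hne : ¬ ((pyMinF k (pyElim a ds)).1 = mu) := fun hc => hle (le_of_eq hc.symm)
                    have step := iha hsub' mu act (nodes + (pyMinF k (pyElim a ds)).2.2)
                        (some mu) (solveF k false (pyElim a ds) memo').2 hIH.2 (Or.inr rfl)
                    simp only [pyMaxLoop, solveLoop, Bool.not_true, hr, hmax, hle, decide_false,
                      if_neg hne, if_false]
                    refine ⟨step.1, step.2.1, step.2.2.1, ?_⟩
                    rcases step.2.2.2 with ⟨hno, _⟩ | hsome
                    · exact absurd hno (by simp)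
                    · exact Or.inr hsome
            have hds : ds ≠ [] := fun h => h0 (by simp [h])
            obtain ⟨e1, e2, einv, ecase⟩ := Loop ds (fun _ h => h) (-69420) (-1111111) 1 none memo hInv (Or.inl ⟨rfl, rfl⟩)
            rcases ecase with ⟨_, hnil, _, _⟩ | ⟨m, hB, hA⟩
            · exact absurd hnil hds
            · have hres : ((solveLoop k true ds ds none (-1111111) 1 memo).1.getD 0,
                  (solveLoop k true ds ds none (-1111111) 1 memo).2.1,
                  (solveLoop k true ds ds none (-1111111) 1 memo).2.2.1) = pvT true ds := by
                have hTs : pvT true ds = pyMaxF (k + 1) ds := by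
                  simp only [pvT, if_true]
                  exact (stab (ds.length + 1) ds (k+1) (Nat.lt_succ_self _) hn).1
                have hMF : pyMaxF (k + 1) ds = pyMaxLoop k ds ds (-69420) (-1111111) 1 := by
                  simp only [pyMaxF, if_neg h0]
                rw [hTs, hMF, hB, Option.getD_some, ← hA, ← e1, ← e2]
              exact ⟨hres, pvInv_insert einv _ _ _ hres⟩
          | false =>
            have Loop : ∀ acts : List Int, (∀ a ∈ acts, a ∈ ds) →
                ∀ (mu act nodes : Int) (best : Option Int) (memo' : Memo), pvInv memo' →
                ((best = none ∧ mu = 69420) ∨ best = some mu) →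
                (pyMinLoop k ds acts mu act nodes).2.1 = (solveLoop k false ds acts best act nodes memo').2.1 ∧
                (pyMinLoop k ds acts mu act nodes).2.2 = (solveLoop k false ds acts best act nodes memo').2.2.1 ∧
                pvInv (solveLoop k false ds acts best act nodes memo').2.2.2 ∧
                ((best = none ∧ acts = [] ∧ (solveLoop k false ds acts best act nodes memo').1 = none ∧ (pyMinLoop k ds acts mu act nodes).1 = mu) ∨
                 (∃ m, (solveLoop k false ds acts best act nodes memo').1 = some m ∧ (pyMinLoop k ds acts mu act nodes).1 = m)) := by
              intro acts
              induction acts with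
              | nil =>
                intro _ mu act nodes best memo' hInv' hrel
                refine ⟨by simp [pyMinLoop, solveLoop], by simp [pyMinLoop, solveLoop],
                  by simpa [solveLoop] using hInv', ?_⟩
                rcases hrel with ⟨rfl, rfl⟩ | rfl
                · exact Or.inl ⟨rfl, rfl, by simp [solveLoop], by simp [pyMinLoop]⟩
                · exact Or.inr ⟨mu, by simp [solveLoop], by simp [pyMinLoop]⟩
              | cons a rest iha =>
                intro hsub mu act nodes best memo' hInv' hrel
                have ha : a ∈ ds := hsub a List.mem_cons_self
                have hsub' : ∀ x ∈ rest, x ∈ ds := fun x hx => hsub x (List.mem_cons_of_mem _ hx)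
                have hlen : (pyElim a ds).length < k := lt_of_lt_of_le (pyElim_len_lt ha) hk
                have hIH := IH k (Nat.lt_succ_self k) true (pyElim a ds) memo' hlen hInv'
                have hr : (solveF k true (pyElim a ds) memo').1 = pyMaxF k (pyElim a ds) := by
                  rw [hIH.1]
                  simp only [pvT, if_true]
                  exact ((stab k (pyElim a ds) ((pyElim a ds).length + 1) hlen (Nat.lt_succ_self _)).1).symm
                rcases hrel with ⟨rfl, rfl⟩ | rfl
                · have hmin : min (pyMaxF k (pyElim a ds)).1 (69420 : Int) = (pyMaxF k (pyElim a ds)).1 :=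
                    min_eq_left (pyMaxF_ub _ _)
                  have step := iha hsub' (pyMaxF k (pyElim a ds)).1 a (nodes + (pyMaxF k (pyElim a ds)).2.2)
                      (some (pyMaxF k (pyElim a ds)).1) (solveF k true (pyElim a ds) memo').2 hIH.2 (Or.inr rfl)
                  simp only [pyMinLoop, solveLoop, Bool.not_false, hr, hmin, eq_self_iff_true, if_true]
                  refine ⟨step.1, step.2.1, step.2.2.1, ?_⟩
                  rcases step.2.2.2 with ⟨hno, _⟩ | hsome
                  · exact absurd hno (by simp)
                  · exact Or.inr hsome
                · by_cases hle : (pyMaxF k (pyElim a ds)).1 ≤ mu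
                  · have hmin : min (pyMaxF k (pyElim a ds)).1 mu = (pyMaxF k (pyElim a ds)).1 :=
                      min_eq_left hle
                    have step := iha hsub' (pyMaxF k (pyElim a ds)).1 a (nodes + (pyMaxF k (pyElim a ds)).2.2)
                        (some (pyMaxF k (pyElim a ds)).1) (solveF k true (pyElim a ds) memo').2 hIH.2 (Or.inr rfl)
                    simp only [pyMinLoop, solveLoop, Bool.not_false, hr, hmin, hle, decide_true,
                      eq_self_iff_true, if_true]
                    refine ⟨step.1, step.2.1, step.2.2.1, ?_⟩
                    rcases step.2.2.2 with ⟨hno, _⟩ | hsome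
                    · exact absurd hno (by simp)
                    · exact Or.inr hsome
                  · have hmin : min (pyMaxF k (pyElim a ds)).1 mu = mu :=
                      min_eq_right (le_of_not_ge hle)
                    have hne : ¬ ((pyMaxF k (pyElim a ds)).1 = mu) := fun hc => hle (le_of_eq hc)
                    have step := iha hsub' mu act (nodes + (pyMaxF k (pyElim a ds)).2.2)
                        (some mu) (solveF k true (pyElim a ds) memo').2 hIH.2 (Or.inr rfl)
                    simp only [pyMinLoop, solveLoop, Bool.not_false, hr, hmin, hle, decide_false,
                      if_neg hne, if_false]
                    refine ⟨step.1, step.2.1, step.2.2.1, ?_⟩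
                    rcases step.2.2.2 with ⟨hno, _⟩ | hsome
                    · exact absurd hno (by simp)
                    · exact Or.inr hsome
            have hds : ds ≠ [] := fun h => h0 (by simp [h])
            obtain ⟨e1, e2, einv, ecase⟩ := Loop ds (fun _ h => h) 69420 (-1111111) 1 none memo hInv (Or.inl ⟨rfl, rfl⟩)
            rcases ecase with ⟨_, hnil, _, _⟩ | ⟨m, hB, hA⟩
            · exact absurd hnil hds
            · have hres : ((solveLoop k false ds ds none (-1111111) 1 memo).1.getD 0,
                  (solveLoop k false ds ds none (-1111111) 1 memo).2.1,
                  (solveLoop k false ds ds none (-1111111) 1 memo).2.2.1) = pvT false ds := by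
                have hTs : pvT false ds = pyMinF (k + 1) ds := by
                  simp only [pvT, Bool.false_eq_true, if_false]
                  exact (stab (ds.length + 1) ds (k+1) (Nat.lt_succ_self _) hn).2
                have hMF : pyMinF (k + 1) ds = pyMinLoop k ds ds 69420 (-1111111) 1 := by
                  simp only [pyMinF, if_neg h0]
                rw [hTs, hMF, hB, Option.getD_some, ← hA, ← e1, ← e2]
              exact ⟨hres, pvInv_insert einv _ _ _ hres⟩


-- ===== VERDICT (by name: the statement is the Claim_ definition above) =====
theorem DG_Max_Value_spec : Claim_equal_DG_Max_Value := by
  intro ds _ _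
  unfold Spec_DG_Max_Value DG_Max_Value DG_Max_Value_alt
  have h := solve_correct (ds.length + 1) true ds PySem.Dict.empty (Nat.lt_succ_self _) pvInv_empty
  have h1 : (solveF (ds.length + 1) true ds PySem.Dict.empty).1 = pyMaxF (ds.length + 1) ds := by
    rw [h.1]; simp [pvT]
  simp only [h1]
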